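-- pv_equiv track=rewrite | github.com/greenspangle/LIN7077_Humanities | assignments/a4_CRUD_files/q10_z_get_words.py | get_longest_words
-- ===== SOURCE A (Python) =====
-- def get_longest_words(list_of_tuples):
--     longest_words = []
--     longest_word_length = 0
--     for a_tuple in list_of_tuples:
--         word_length = a_tuple[1] - a_tuple[0]
--         if word_length > longest_word_length:
--             # new longest word length
--             longest_word_length = word_length
--             longest_words.clear()
--             longest_words.append(a_tuple)
--         elif word_length == longest_word_length:
--             # another longest word, so add to list
--             longest_words.append(a_tuple)
--     return longest_words
-- ===== SOURCE B (Python) =====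
-- def get_longest_words(list_of_tuples):
--     # two passes: find the maximum span (floored at 0, like A's initializer),
--     # then keep, in order, every tuple achieving it
--     max_len = max([t[1] - t[0] for t in list_of_tuples] + [0])
--     return [t for t in list_of_tuples if t[1] - t[0] == max_len]
-- ===== Notes on version B (the rewrite author's own statement) =====
-- stated objective: simpler
-- what changed: Replaces the stateful accumulate-or-clear single pass with a two-pass find-max-then-filter: compute max span (with a 0 floor matching A's initializer), then one filter over the list.
import Mathlib
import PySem

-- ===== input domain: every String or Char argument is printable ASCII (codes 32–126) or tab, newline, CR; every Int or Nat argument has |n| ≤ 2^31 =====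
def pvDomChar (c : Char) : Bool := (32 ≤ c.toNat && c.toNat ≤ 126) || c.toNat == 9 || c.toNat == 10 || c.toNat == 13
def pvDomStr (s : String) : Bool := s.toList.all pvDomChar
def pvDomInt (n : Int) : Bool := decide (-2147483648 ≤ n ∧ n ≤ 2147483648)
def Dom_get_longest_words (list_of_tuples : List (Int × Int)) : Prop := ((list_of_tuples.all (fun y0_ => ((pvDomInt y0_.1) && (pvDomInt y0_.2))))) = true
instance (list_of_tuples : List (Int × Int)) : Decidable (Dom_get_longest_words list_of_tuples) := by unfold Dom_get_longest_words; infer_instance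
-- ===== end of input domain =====

-- B is a two-pass find-max-then-filter rewrite of A's accumulate-or-clear loop (same O(n) cost, simpler structure).

-- ===== PORT A =====
-- A's loop state: (longest_words, longest_word_length); one step of A's for-loop body
def pvStepA (st : List (Int × Int) × Int) (a_tuple : Int × Int) : List (Int × Int) × Int :=
  let word_length := a_tuple.2 - a_tuple.1
  if word_length > st.2 then ([a_tuple], word_length)
  else if word_length = st.2 then (st.1 ++ [a_tuple], st.2)
  else st

def get_longest_words (list_of_tuples : List (Int × Int)) : List (Int × Int) :=
  (list_of_tuples.foldl pvStepA ([], 0)).1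

-- ===== PORT B =====
-- Python's max over the nonempty list spans++[0] is exact as foldl max 0 since 0 is in the list
def get_longest_words_alt (list_of_tuples : List (Int × Int)) : List (Int × Int) :=
  let max_len := ((list_of_tuples.map (fun t : Int × Int => t.2 - t.1)) ++ [0]).foldl max 0
  list_of_tuples.filter (fun t => t.2 - t.1 == max_len)

-- ===== PRECONDITION & SPEC =====
def Spec_get_longest_words (list_of_tuples : List (Int × Int)) (out : List (Int × Int)) : Prop := out = get_longest_words_alt list_of_tuples
instance (list_of_tuples : List (Int × Int)) (out : List (Int × Int)) : Decidable (Spec_get_longest_words list_of_tuples out) := by unfold Spec_get_longest_words; infer_instance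

-- ===== CLAIM (what is proved, stated in full; the proofs are below) =====
def Claim_equal_get_longest_words : Prop := ∀ (list_of_tuples : List (Int × Int)), Dom_get_longest_words list_of_tuples → Spec_get_longest_words list_of_tuples (get_longest_words list_of_tuples)

-- ===== LEMMAS AND PROOFS =====

lemma le_foldl_max (l : List Int) : ∀ {a b : Int}, a ≤ b → a ≤ l.foldl max b := by
  induction l with
  | nil => intro a b h; simpa using h
  | cons x xs ih =>
    intro a b h
    simp only [List.foldl_cons]
    exact ih (le_trans h (le_max_left b x))

-- invariant of A's loop: with state (acc, L), the final state is
-- (filter by the new max if it rose above L, otherwise acc ++ filter by L; running max)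
lemma loopA_inv (xs : List (Int × Int)) : ∀ (acc : List (Int × Int)) (L : Int),
    xs.foldl pvStepA (acc, L) =
      (if L < (xs.map (fun t => t.2 - t.1)).foldl max L then
         xs.filter (fun t => t.2 - t.1 == (xs.map (fun t => t.2 - t.1)).foldl max L)
       else acc ++ xs.filter (fun t => t.2 - t.1 == L),
       (xs.map (fun t => t.2 - t.1)).foldl max L) := by
  induction xs with
  | nil => intro acc L; simp
  | cons t rest ih =>
    intro acc L
    have hM : ∀ c : Int, (rest.map (fun t => t.2 - t.1)).foldl max c ≥ c :=
      fun c => le_foldl_max _ le_rfl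
    simp only [List.foldl_cons, List.map_cons, List.filter_cons, pvStepA]
    by_cases h1 : t.2 - t.1 > L
    · -- new longest: state becomes ([t], s)
      rw [if_pos h1, ih]
      have hmax : max L (t.2 - t.1) = t.2 - t.1 := max_eq_right (le_of_lt h1)
      rw [hmax]
      set s := t.2 - t.1 with hs
      set M := (rest.map (fun t => t.2 - t.1)).foldl max s with hMdef
      have hsM : s ≤ M := hM s
      by_cases h2 : s < M
      · rw [if_pos h2, if_pos (lt_trans h1 h2)]
        have hne : (t.2 - t.1 == M) = false := by simp [← hs]; omega
        simp
        omega
      · have hEq : M = s := le_antisymm (not_lt.mp h2) hsM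
        rw [if_neg h2, if_pos (by omega : L < M)]
        simp [hEq]
    · rw [if_neg h1]
      have hmax : max L (t.2 - t.1) = L := max_eq_left (not_lt.mp h1)
      by_cases h2 : t.2 - t.1 = L
      · -- equal: append
        rw [if_pos h2, ih]
        rw [hmax]
        set M := (rest.map (fun t => t.2 - t.1)).foldl max L with hMdef
        by_cases h3 : L < M
        · rw [if_pos h3, if_pos h3]
          have : (t.2 - t.1 == M) = false := by simp [h2]; omega
          simp [this]
        · rw [if_neg h3, if_neg h3]
          have : (t.2 - t.1 == L) = true := by simp [h2]
          simp [this]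
      · -- shorter: unchanged
        rw [if_neg h2, ih]
        rw [hmax]
        set M := (rest.map (fun t => t.2 - t.1)).foldl max L with hMdef
        by_cases h3 : L < M
        · rw [if_pos h3, if_pos h3]
          have : (t.2 - t.1 == M) = false := by
            simp only [beq_eq_false_iff_ne, ne_eq]; intro he; omega
          simp [this]
        · rw [if_neg h3, if_neg h3]
          have : (t.2 - t.1 == L) = false := by simp [h2]
          simp [this]

lemma foldl_max_append_zero (l : List Int) :
    (l ++ [0]).foldl max 0 = l.foldl max 0 := by
  have h0 : (0 : Int) ≤ l.foldl max 0 := le_foldl_max _ le_rfl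
  simp [List.foldl_append, max_eq_left h0]

-- ===== VERDICT (by name: the statement is the Claim_ definition above) =====
theorem get_longest_words_spec : Claim_equal_get_longest_words := by
  intro xs _
  unfold Spec_get_longest_words get_longest_words get_longest_words_alt
  rw [loopA_inv, foldl_max_append_zero]
  set M := (xs.map (fun t => t.2 - t.1)).foldl max 0 with hM
  have h0 : (0 : Int) ≤ M := le_foldl_max _ le_rfl
  by_cases h : (0 : Int) < M
  · simp [h]
  · have : M = 0 := le_antisymm (not_lt.mp h) h0
    simp [this]
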